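-- pv_equiv track=rewrite | github.com/knolp/AoC2020 | 17_day.py | find
-- ===== SOURCE A (Python) =====
-- import itertools
--
-- def get_neighbours(cube, dim):
--     neighbours = [p for p in itertools.product([-1,0,1], repeat=dim)]
--     if dim == 4:
--         w,z,x,y = cube
--         neighbours = [(w + ww, z + zz, x + xx, y + yy) for ww,zz,xx,yy in neighbours]
--     elif dim == 3:
--         z,x,y = cube
--         neighbours = [(z + zz, x + xx, y + yy) for zz,xx,yy in neighbours]
--     return neighbours
--
-- def find(lista, dim):
--     #create dict of lista
--     cubes = {}
--     for i in range(len(lista)):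
--         for j in range(len(lista[0])):
--             if lista[i][j]:
--                 if dim == 4:
--                     cubes[(0,0,i,j)] = True
--                 elif dim == 3:
--                     cubes[(0,i,j)] = True
--
--     for i in range(6):
--         #Set current neighbours to empty
--         neighbours = {}
--
--         #For each active cube, get the neighbours and add it do dict, if is already in dict, +1
--         for k in cubes.keys():
--             for item in get_neighbours(k, dim):
--                 if item not in neighbours.keys():
--                     neighbours[item] = 1
--                 else:
--                     neighbours[item] += 1
--
--         # For seen neighbours, we check how many times it was seen and disable / enable it accordingly
--         for k,v in neighbours.items():
--             if k in cubes.keys():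
--                 if v not in [3,4]:
--                     cubes.pop(k)
--             else:
--                 if v == 3:
--                     cubes[k] = True
--     return len(cubes.keys())
-- ===== SOURCE B (Python) =====
-- import itertools
--
-- def find(lista, dim):
--     # Build the initial active set (same indexing as the original: ragged/empty
--     # rows shorter than row 0 raise IndexError identically).
--     if dim == 4:
--         active = {(0, 0, i, j) for i in range(len(lista))
--                   for j in range(len(lista[0])) if lista[i][j]}
--     elif dim == 3:
--         active = {(0, i, j) for i in range(len(lista))
--                   for j in range(len(lista[0])) if lista[i][j]}
--     else:
--         return 0
--     zero = (0,) * dim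
--     offsets = [o for o in itertools.product((-1, 0, 1), repeat=dim) if o != zero]
--     for _ in range(6):
--         candidates = set(active)
--         for c in active:
--             for o in offsets:
--                 candidates.add(tuple(x + y for x, y in zip(c, o)))
--         nxt = set()
--         for c in candidates:
--             n = sum(1 for o in offsets
--                     if tuple(x + y for x, y in zip(c, o)) in active)
--             if n == 3 or (n == 2 and c in active):
--                 nxt.add(c)
--         active = nxt
--     return len(active)
-- ===== Notes on version B (the rewrite author's own statement) =====
-- stated objective: alternative
-- what changed: Replaces A's scatter pass (a dict counting how often each cell is touched by each active cube's 3^dim neighbourhood, including the cube itself, then pruning with the shifted survive-{3,4} rule) with a gather pass: build the candidate set (active cells plus their true neighbours), count each candidate's live neighbours directly, and apply the standard survive-2/3, born-3 rule over sets.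
import Mathlib
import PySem

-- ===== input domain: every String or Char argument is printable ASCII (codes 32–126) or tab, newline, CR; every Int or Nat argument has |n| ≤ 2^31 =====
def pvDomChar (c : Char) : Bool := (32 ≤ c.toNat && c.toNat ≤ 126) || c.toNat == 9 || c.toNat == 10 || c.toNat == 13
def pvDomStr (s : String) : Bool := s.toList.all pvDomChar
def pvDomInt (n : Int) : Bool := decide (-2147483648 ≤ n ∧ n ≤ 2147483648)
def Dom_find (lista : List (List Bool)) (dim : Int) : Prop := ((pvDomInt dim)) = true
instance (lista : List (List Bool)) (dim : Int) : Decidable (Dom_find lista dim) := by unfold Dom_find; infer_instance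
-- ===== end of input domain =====

-- B replaces A's scatter neighbour-counting dict with a gather pass over the candidate set
-- (active cells and their true neighbours), using the standard survive-2/3, born-3 rule;
-- same asymptotic cost (objective: alternative decomposition).

-- ===== PORT A =====
-- itertools.product([-1,0,1], repeat=n)
def pvProdRep : Nat → List (List Int)
  | 0 => [[]]
  | n + 1 => [-1, 0, 1].flatMap (fun x => (pvProdRep n).map (x :: ·))

def get_neighbours (cube : List Int) (dim : Int) : List (List Int) :=
  let neighbours := pvProdRep dim.toNat
  if dim = 4 then
    match cube with
    | [w, z, x, y] =>
        neighbours.map (fun o =>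
          match o with
          | [ww, zz, xx, yy] => [w + ww, z + zz, x + xx, y + yy]
          | _ => o)             -- unreachable: every offset has 4 components
    | _ => neighbours           -- unreachable: 4-dim keys are 4-tuples
  else if dim = 3 then
    match cube with
    | [z, x, y] =>
        neighbours.map (fun o =>
          match o with
          | [zz, xx, yy] => [z + zz, x + xx, y + yy]
          | _ => o)             -- unreachable
    | _ => neighbours           -- unreachable
  else neighbours

-- Python's dict is hash-based (O(1) lookup) and iterates in insertion order. PvHDict ports it
-- exactly: a Std.HashMap for the mapping plus the key insertion order (newest first); proved
-- below to coincide, operation for operation, with the assoc-list model PySem.Dict.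
structure PvHDict (ν : Type) where
  rev : List (List Int)
  hm : Std.HashMap (List Int) ν

def PvHDict.empty {ν : Type} : PvHDict ν := ⟨[], ∅⟩

def PvHDict.get? {ν : Type} (d : PvHDict ν) (k : List Int) : Option ν := d.hm[k]?

def PvHDict.getD {ν : Type} (d : PvHDict ν) (k : List Int) (d0 : ν) : ν := (d.hm[k]?).getD d0

def PvHDict.contains {ν : Type} (d : PvHDict ν) (k : List Int) : Bool := (d.hm[k]?).isSome

def PvHDict.insert {ν : Type} (d : PvHDict ν) (k : List Int) (v : ν) : PvHDict ν :=
  if (d.hm[k]?).isSome then ⟨d.rev, d.hm.insert k v⟩ else ⟨k :: d.rev, d.hm.insert k v⟩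

def PvHDict.modify {ν : Type} (d : PvHDict ν) (k : List Int) (d0 : ν) (f : ν → ν) : PvHDict ν :=
  d.insert k (f (d.getD k d0))

def PvHDict.erase {ν : Type} (d : PvHDict ν) (k : List Int) : PvHDict ν :=
  ⟨d.rev.filter (fun x => !(x == k)), d.hm.erase k⟩

def PvHDict.keys {ν : Type} (d : PvHDict ν) : List (List Int) := d.rev.reverse

def PvHDict.items {ν : Type} (d : PvHDict ν) : List (List Int × ν) :=
  d.rev.reverse.filterMap (fun k => (d.hm[k]?).map (fun v => (k, v)))

-- one generation of A's simulation (the body of `for i in range(6)`)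
-- the neighbours-counting dict (first inner loop of a generation)
def pvNbCount (dim : Int) (ks : List (List Int)) : PvHDict Int :=
  ks.foldl (fun nb k =>
    (get_neighbours k dim).foldl (fun nb item =>
      if (nb.get? item).isNone then nb.insert item 1 else nb.modify item 0 (· + 1)) nb)
    PvHDict.empty

def pvStepA (dim : Int) (cubes : PvHDict Bool) : PvHDict Bool :=
  (pvNbCount dim cubes.keys).items.foldl (fun cubes kv =>
    if cubes.contains kv.1 = true then
      if ¬(kv.2 = 3 ∨ kv.2 = 4) then cubes.erase kv.1 else cubes
    else
      if kv.2 = 3 then cubes.insert kv.1 true else cubes) cubes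

def find (lista : List (List Bool)) (dim : Int) : Int :=
  let cubes : PvHDict Bool :=
    (List.range lista.length).foldl (fun cubes i =>
      (List.range (lista.headD []).length).foldl (fun cubes j =>
        if (lista.getD i []).getD j false then
          if dim = 4 then cubes.insert [0, 0, (i : Int), (j : Int)] true
          else if dim = 3 then cubes.insert [0, (i : Int), (j : Int)] true
          else cubes
        else cubes) cubes) PvHDict.empty
  let cubes := (List.range 6).foldl (fun cubes _ => pvStepA dim cubes) cubes
  ((cubes.keys.length : Nat) : Int)

-- ===== PORT B =====
-- tuple(x + y for x, y in zip(c, o))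
def pvAddVec (c o : List Int) : List Int := List.zipWith (· + ·) c o

-- the 3^d − 1 true neighbour offsets
def pvOffsets (d : Nat) : List (List Int) :=
  (pvProdRep d).filter (fun o => decide (o ≠ List.replicate d 0))

-- Python's set, ported like the dict: hash membership plus insertion order.
structure PvHSet where
  rev : List (List Int)
  hm : Std.HashMap (List Int) Unit

def PvHSet.empty : PvHSet := ⟨[], ∅⟩

def PvHSet.contains (s : PvHSet) (x : List Int) : Bool := (s.hm[x]?).isSome

def PvHSet.add (s : PvHSet) (x : List Int) : PvHSet :=
  if (s.hm[x]?).isSome then s else ⟨x :: s.rev, s.hm.insert x ()⟩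

def PvHSet.toList (s : PvHSet) : List (List Int) := s.rev.reverse

def PvHSet.size (s : PvHSet) : Nat := s.rev.length

-- the initial active set ({...} comprehension over the same index ranges as A)
def pvInitB (lista : List (List Bool)) (mk : Nat → Nat → List Int) : PvHSet :=
  (List.range lista.length).foldl (fun s i =>
    (List.range (lista.headD []).length).foldl (fun s j =>
      if (lista.getD i []).getD j false then PvHSet.add s (mk i j) else s) s)
    PvHSet.empty

-- one generation of B's simulation: gather over the candidate set
-- the candidate set: the active cells and their true neighbours
def pvCandH (offsets : List (List Int)) (active : PvHSet) : PvHSet :=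
  active.toList.foldl (fun cs c =>
    offsets.foldl (fun cs o => PvHSet.add cs (pvAddVec c o)) cs) active

def pvStepB (offsets : List (List Int)) (active : PvHSet) : PvHSet :=
  (pvCandH offsets active).toList.foldl (fun nxt c =>
    let n := offsets.countP (fun o => active.contains (pvAddVec c o))
    if n = 3 ∨ (n = 2 ∧ active.contains c = true) then PvHSet.add nxt c
    else nxt) PvHSet.empty

def find_alt (lista : List (List Bool)) (dim : Int) : Int :=
  if dim = 4 then
    (((List.range 6).foldl (fun a _ => pvStepB (pvOffsets 4) a)
      (pvInitB lista (fun i j => [0, 0, (i : Int), (j : Int)]))).size : Int)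
  else if dim = 3 then
    (((List.range 6).foldl (fun a _ => pvStepB (pvOffsets 3) a)
      (pvInitB lista (fun i j => [0, (i : Int), (j : Int)]))).size : Int)
  else 0

-- ===== PRECONDITION & SPEC =====
-- Pre_ excludes only ragged grids whose row 0 is longer than some later row: there the
-- Python A raises IndexError (and so does B for dim 3/4).
def Pre_find (lista : List (List Bool)) (dim : Int) : Prop :=
  ∀ r ∈ lista, (lista.headD []).length ≤ r.length
instance (lista : List (List Bool)) (dim : Int) : Decidable (Pre_find lista dim) := by
  unfold Pre_find; infer_instance

def pvWitness_find : List (List Bool) × Int := ([[true, true, true], [true, false, false]], 3)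

def Spec_find (lista : List (List Bool)) (dim : Int) (out : Int) : Prop := out = find_alt lista dim
instance (lista : List (List Bool)) (dim : Int) (out : Int) : Decidable (Spec_find lista dim out) := by
  unfold Spec_find; infer_instance

-- ===== CLAIM (what is proved, stated in full; the proofs are below) =====
def Claim_equal_find : Prop := ∀ (lista : List (List Bool)) (dim : Int),
  Dom_find lista dim → Pre_find lista dim → Spec_find lista dim (find lista dim)

-- ===== LEMMAS AND PROOFS =====

-- ---- the assoc-list reference programs (proof layer: PySem models of the two ports) ----
-- one generation of A's simulation (the body of `for i in range(6)`)
def pvNbCountP (dim : Int) (ks : List (List Int)) : PySem.Dict (List Int) Int :=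
  ks.foldl (fun nb k =>
    (get_neighbours k dim).foldl (fun nb item =>
      if (nb.get? item).isNone then nb.insert item 1 else nb.modify item 0 (· + 1)) nb)
    PySem.Dict.empty

def pvStepAP (dim : Int) (cubes : PySem.Dict (List Int) Bool) : PySem.Dict (List Int) Bool :=
  (pvNbCountP dim cubes.keys).items.foldl (fun cubes kv =>
    if cubes.contains kv.1 = true then
      if ¬(kv.2 = 3 ∨ kv.2 = 4) then cubes.erase kv.1 else cubes
    else
      if kv.2 = 3 then cubes.insert kv.1 true else cubes) cubes

def pvFindP (lista : List (List Bool)) (dim : Int) : Int :=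
  let cubes : PySem.Dict (List Int) Bool :=
    (List.range lista.length).foldl (fun cubes i =>
      (List.range (lista.headD []).length).foldl (fun cubes j =>
        if (lista.getD i []).getD j false then
          if dim = 4 then cubes.insert [0, 0, (i : Int), (j : Int)] true
          else if dim = 3 then cubes.insert [0, (i : Int), (j : Int)] true
          else cubes
        else cubes) cubes) PySem.Dict.empty
  let cubes := (List.range 6).foldl (fun cubes _ => pvStepAP dim cubes) cubes
  ((cubes.keys.length : Nat) : Int)

-- the initial active set ({...} comprehension over the same index ranges as A)
def pvInitBP (lista : List (List Bool)) (mk : Nat → Nat → List Int) : PySem.Set (List Int) :=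
  (List.range lista.length).foldl (fun s i =>
    (List.range (lista.headD []).length).foldl (fun s j =>
      if (lista.getD i []).getD j false then PySem.Set.add s (mk i j) else s) s)
    PySem.Set.empty

-- one generation of B's simulation: gather over the candidate set
def pvCand (offsets : List (List Int)) (active : PySem.Set (List Int)) :
    PySem.Set (List Int) :=
  active.foldl (fun cs c =>
    offsets.foldl (fun cs o => PySem.Set.add cs (pvAddVec c o)) cs)
    active

def pvStepBP (offsets : List (List Int)) (active : PySem.Set (List Int)) :
    PySem.Set (List Int) :=
  (pvCand offsets active).foldl (fun nxt c =>
    let n := offsets.countP (fun o => PySem.Set.contains active (pvAddVec c o))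
    if n = 3 ∨ (n = 2 ∧ PySem.Set.contains active c = true) then PySem.Set.add nxt c
    else nxt) PySem.Set.empty

def pvAltP (lista : List (List Bool)) (dim : Int) : Int :=
  if dim = 4 then
    (((List.range 6).foldl (fun a _ => pvStepBP (pvOffsets 4) a)
      (pvInitBP lista (fun i j => [0, 0, (i : Int), (j : Int)]))).length : Int)
  else if dim = 3 then
    (((List.range 6).foldl (fun a _ => pvStepBP (pvOffsets 3) a)
      (pvInitBP lista (fun i j => [0, (i : Int), (j : Int)]))).length : Int)
  else 0




-- the closed 3^d neighbourhood of a cell (gather form of get_neighbours)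
def pvNbhd (d : Nat) (c : List Int) : List (List Int) := (pvProdRep d).map (pvAddVec c)

-- all cells of a list have length d
def pvCellsOK (d : Nat) (S : List (List Int)) : Prop := ∀ c ∈ S, c.length = d

-- ---- offsets facts ----
theorem pvProdRep_length {d : Nat} {o : List Int} (h : o ∈ pvProdRep d) : o.length = d := by
  induction d generalizing o with
  | zero => simp [pvProdRep] at h; simp [h]
  | succ n ih =>
      simp only [pvProdRep, List.mem_flatMap, List.mem_map] at h
      obtain ⟨x, -, o', ho', rfl⟩ := h
      simp [ih ho']

theorem pvProdRep_nodup (d : Nat) : (pvProdRep d).Nodup := by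
  induction d with
  | zero => simp [pvProdRep]
  | succ n ih =>
      rw [pvProdRep, List.nodup_flatMap]
      refine ⟨fun x _ => ih.map (fun a b h => by simpa using h), ?_⟩
      have disj : ∀ a b : Int, a ≠ b →
          List.Disjoint ((pvProdRep n).map (a :: ·)) ((pvProdRep n).map (b :: ·)) := by
        rintro a b hab x hx hy
        simp only [List.mem_map] at hx hy
        obtain ⟨u, -, rfl⟩ := hx
        obtain ⟨v, -, hv⟩ := hy
        exact hab ((List.cons.injEq _ _ _ _).mp hv.symm).1
      refine List.Pairwise.cons ?_ (List.Pairwise.cons ?_ (List.Pairwise.cons ?_ List.Pairwise.nil))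
      · intro b hb
        rcases List.mem_cons.mp hb with rfl | hb'
        · exact disj _ _ (by norm_num)
        · rcases List.mem_cons.mp hb' with rfl | h
          · exact disj _ _ (by norm_num)
          · simp at h
      · intro b hb
        rcases List.mem_cons.mp hb with rfl | hb'
        · exact disj _ _ (by norm_num)
        · simp at hb'
      · intro b hb
        simp at hb

theorem pvProdRep_mem_replicate (d : Nat) : List.replicate d (0 : Int) ∈ pvProdRep d := by
  induction d with
  | zero => simp [pvProdRep]
  | succ n ih =>
      simp only [pvProdRep, List.mem_flatMap, List.mem_map, List.replicate_succ]
      exact ⟨0, by simp, List.replicate n 0, ih, rfl⟩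

theorem pvProdRep_mem_neg {d : Nat} {o : List Int} (h : o ∈ pvProdRep d) :
    o.map (fun z => -z) ∈ pvProdRep d := by
  induction d generalizing o with
  | zero => simp [pvProdRep] at h ⊢; simp [h]
  | succ n ih =>
      simp only [pvProdRep, List.mem_flatMap, List.mem_map] at h ⊢
      obtain ⟨x, hx, o', ho', rfl⟩ := h
      refine ⟨-x, ?_, o'.map (fun z => -z), ih ho', rfl⟩
      fin_cases hx <;> simp

-- ---- pvAddVec facts ----
theorem pvAddVec_length {c o : List Int} (h : c.length = o.length) :
    (pvAddVec c o).length = c.length := by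
  simp [pvAddVec, h]

theorem pvAddVec_replicate_zero (c : List Int) :
    pvAddVec c (List.replicate c.length 0) = c := by
  induction c with
  | nil => rfl
  | cons a t ih => simp [pvAddVec, List.replicate_succ] at ih ⊢; simpa using ih

theorem pvAddVec_cancel {c o : List Int} (h : c.length = o.length) :
    pvAddVec (pvAddVec c o) (o.map (fun z => -z)) = c := by
  induction c generalizing o with
  | nil => simp [pvAddVec]
  | cons a t ih =>
      cases o with
      | nil => simp at h
      | cons b s => simp [pvAddVec] at h ⊢; exact ih h

theorem pvAddVec_inj {c o₁ o₂ : List Int} (h₁ : o₁.length = c.length)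
    (h₂ : o₂.length = c.length) (h : pvAddVec c o₁ = pvAddVec c o₂) : o₁ = o₂ := by
  induction c generalizing o₁ o₂ with
  | nil => cases o₁ <;> cases o₂ <;> simp_all
  | cons a t ih =>
      cases o₁ with
      | nil => simp at h₁
      | cons b₁ s₁ =>
          cases o₂ with
          | nil => simp at h₂
          | cons b₂ s₂ =>
              simp [pvAddVec] at h h₁ h₂ ⊢
              exact ⟨by omega, ih h₁ h₂ h.2⟩

-- ---- pvNbhd facts ----
theorem mem_pvNbhd {d : Nat} {c k : List Int} :
    k ∈ pvNbhd d c ↔ ∃ o ∈ pvProdRep d, k = pvAddVec c o := by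
  simp [pvNbhd, eq_comm]

theorem self_mem_pvNbhd {d : Nat} {c : List Int} (hc : c.length = d) : c ∈ pvNbhd d c := by
  rw [mem_pvNbhd]
  exact ⟨List.replicate d 0, pvProdRep_mem_replicate d,
    by rw [← hc, pvAddVec_replicate_zero]⟩

theorem length_of_mem_pvNbhd {d : Nat} {c k : List Int} (hc : c.length = d)
    (h : k ∈ pvNbhd d c) : k.length = d := by
  rw [mem_pvNbhd] at h
  obtain ⟨o, ho, rfl⟩ := h
  rw [pvAddVec_length (by rw [hc, pvProdRep_length ho]), hc]

theorem pvNbhd_nodup {d : Nat} {c : List Int} (hc : c.length = d) : (pvNbhd d c).Nodup := by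
  refine List.Nodup.map_on ?_ (pvProdRep_nodup d)
  intro x hx y hy hxy
  exact pvAddVec_inj (by rw [pvProdRep_length hx, hc]) (by rw [pvProdRep_length hy, hc]) hxy

theorem mem_pvNbhd_comm {d : Nat} {c k : List Int} (hc : c.length = d) (hk : k.length = d) :
    k ∈ pvNbhd d c ↔ c ∈ pvNbhd d k := by
  constructor <;> intro h <;> rw [mem_pvNbhd] at h ⊢ <;>
    obtain ⟨o, ho, he⟩ := h <;>
    refine ⟨o.map (fun z => -z), pvProdRep_mem_neg ho, ?_⟩ <;>
    · rw [he, pvAddVec_cancel]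
      first
        | rw [hc, pvProdRep_length ho]
        | rw [hk, pvProdRep_length ho]

-- get_neighbours is pvNbhd on well-shaped cells
theorem get_neighbours_eq_3 {c : List Int} (hc : c.length = 3) :
    get_neighbours c 3 = pvNbhd 3 c := by
  obtain ⟨z, x, y, rfl⟩ : ∃ z x y, c = [z, x, y] := by
    match c, hc with
    | [z, x, y], _ => exact ⟨z, x, y, rfl⟩
  rw [get_neighbours, pvNbhd]
  simp only [show (((3 : Int)) = 4) = False by simp, if_false]
  refine List.map_congr_left ?_
  intro o ho
  have h3 : o.length = 3 := pvProdRep_length (by simpa using ho)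
  match o, h3 with
  | [zz, xx, yy], _ => rfl

theorem get_neighbours_eq_4 {c : List Int} (hc : c.length = 4) :
    get_neighbours c 4 = pvNbhd 4 c := by
  obtain ⟨w, z, x, y, rfl⟩ : ∃ w z x y, c = [w, z, x, y] := by
    match c, hc with
    | [w, z, x, y], _ => exact ⟨w, z, x, y, rfl⟩
  rw [get_neighbours, pvNbhd]
  refine List.map_congr_left ?_
  intro o ho
  have h4 : o.length = 4 := pvProdRep_length (by simpa using ho)
  match o, h4 with
  | [ww, zz, xx, yy], _ => rfl

-- ---- pvOffsets facts ----
theorem mem_pvOffsets {d : Nat} {o : List Int} :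
    o ∈ pvOffsets d ↔ o ∈ pvProdRep d ∧ o ≠ List.replicate d 0 := by
  simp [pvOffsets]

-- ---- generic fold helpers ----
theorem foldl_preserve {α β : Type} (P : α → Prop) (f : α → β → α) (l : List β)
    (h : ∀ a b, P a → P (f a b)) : ∀ a, P a → P (l.foldl f a) := by
  induction l with
  | nil => intro a ha; exact ha
  | cons x t ih => intro a ha; exact ih _ (h a x ha)

theorem foldl_rel {α β γ : Type} (R : α → β → Prop) (f : α → α) (g : β → β)
    (h : ∀ a b, R a b → R (f a) (g b)) :
    ∀ (l : List γ) a b, R a b → R (l.foldl (fun a _ => f a) a) (l.foldl (fun b _ => g b) b) := by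
  intro l
  induction l with
  | nil => intro a b hab; exact hab
  | cons x t ih => intro a b hab; exact ih _ _ (h a b hab)

theorem pvAddVec_eq_self {d : Nat} {c o : List Int} (hc : c.length = d) (ho : o.length = d) :
    pvAddVec c o = c ↔ o = List.replicate d 0 := by
  constructor
  · intro h
    refine pvAddVec_inj (c := c) (by omega) (by simp; omega) ?_
    have hrz : pvAddVec c (List.replicate d 0) = c := by rw [← hc, pvAddVec_replicate_zero]
    rw [hrz]; exact h
  · rintro rfl
    rw [← hc, pvAddVec_replicate_zero]

theorem mem_pvNbhd_iff_self_or_offset {d : Nat} {c k : List Int} (hc : c.length = d) :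
    k ∈ pvNbhd d c ↔ k = c ∨ ∃ o ∈ pvOffsets d, k = pvAddVec c o := by
  rw [mem_pvNbhd]
  constructor
  · rintro ⟨o, ho, rfl⟩
    by_cases h0 : o = List.replicate d 0
    · left; subst h0; rw [← hc, pvAddVec_replicate_zero]
    · right; exact ⟨o, mem_pvOffsets.mpr ⟨ho, h0⟩, rfl⟩
  · rintro (rfl | ⟨o, ho, rfl⟩)
    · exact ⟨_, pvProdRep_mem_replicate d, by rw [← hc, pvAddVec_replicate_zero]⟩
    · exact ⟨o, (mem_pvOffsets.mp ho).1, rfl⟩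

theorem pvOffsets_nodup (d : Nat) : (pvOffsets d).Nodup :=
  (pvProdRep_nodup d).filter _

theorem pvOffsets_length {d : Nat} {o : List Int} (h : o ∈ pvOffsets d) : o.length = d :=
  pvProdRep_length (mem_pvOffsets.mp h).1

-- ---- counting helpers ----
theorem pvCountP_or_disjoint {α : Type} {l : List α} {p q : α → Prop}
    [DecidablePred p] [DecidablePred q] (h : ∀ a ∈ l, ¬(p a ∧ q a)) :
    l.countP (fun a => decide (p a ∨ q a)) =
      l.countP (fun a => decide (p a)) + l.countP (fun a => decide (q a)) := by
  induction l with
  | nil => simp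
  | cons x t ih =>
      have hx := h x (by simp)
      have ht : ∀ a ∈ t, ¬(p a ∧ q a) := fun a ha => h a (by simp [ha])
      have ih' := ih ht
      simp only [show ∀ a, decide (p a ∨ q a) = (decide (p a) || decide (q a)) from fun a => by by_cases p a <;> by_cases q a <;> simp [*]] at ih'
      by_cases hp : p x <;> by_cases hq : q x
      · exact absurd ⟨hp, hq⟩ hx
      all_goals
        simp only [List.countP_cons, decide_eq_true_eq]
        simp [hp, hq, ih']
        try omega

theorem pvCountP_mem_comm {l m : List (List Int)} (hl : l.Nodup) (hm : m.Nodup) :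
    l.countP (fun a => decide (a ∈ m)) = m.countP (fun a => decide (a ∈ l)) := by
  have hset : (l.filter (fun a => decide (a ∈ m))).toFinset
      = (m.filter (fun a => decide (a ∈ l))).toFinset := by
    ext a
    simp only [List.mem_toFinset, List.mem_filter, decide_eq_true_eq]
    tauto
  rw [List.countP_eq_length_filter, List.countP_eq_length_filter,
    ← List.toFinset_card_of_nodup (hl.filter _),
    ← List.toFinset_card_of_nodup (hm.filter _), hset]

theorem pvCount_nodup_ite {α : Type} [BEq α] [LawfulBEq α] {l : List α} (h : l.Nodup) (x : α) :
    l.count x = if x ∈ l then 1 else 0 := by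
  split_ifs with hx
  · exact List.count_eq_one_of_mem h hx
  · exact List.count_eq_zero_of_not_mem hx

theorem pvCountP_eq_self_ite {l : List (List Int)} (h : l.Nodup) (x : List Int) :
    l.countP (fun a => decide (a = x)) = if x ∈ l then 1 else 0 := by
  rw [← pvCount_nodup_ite h x]
  unfold List.count
  exact List.countP_congr (fun a _ => by simp)

theorem pvCount_flatMap_nbhd {d : Nat} {dim : Int} {K : List (List Int)}
    (hK : pvCellsOK d K) (hgn : ∀ c ∈ K, get_neighbours c dim = pvNbhd d c) (x : List Int) :
    (K.flatMap (fun c => get_neighbours c dim)).count x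
      = K.countP (fun a => decide (x ∈ pvNbhd d a)) := by
  induction K with
  | nil => simp
  | cons c t ih =>
      have hct : pvCellsOK d t := fun a ha => hK a (by simp [ha])
      have hgt : ∀ a ∈ t, get_neighbours a dim = pvNbhd d a :=
        fun a ha => hgn a (by simp [ha])
      have hcnt : (get_neighbours c dim).count x = if x ∈ pvNbhd d c then 1 else 0 := by
        rw [hgn c (by simp), pvCount_nodup_ite (pvNbhd_nodup (hK c (by simp)))]
      simp only [List.flatMap_cons, List.count_append, List.countP_cons, hcnt, ih hct hgt]
      by_cases hx : x ∈ pvNbhd d c <;> simp [hx] <;> omega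

-- ---- Dict.erase facts (not in the prelude) ----
theorem pvDict_contains_erase {κ ν : Type} [BEq κ] [LawfulBEq κ]
    (d : PySem.Dict κ ν) (k x : κ) :
    ((d.erase k).contains x = true) ↔ x ≠ k ∧ d.contains x = true := by
  simp only [PySem.Dict.erase, PySem.Dict.contains, List.any_eq_true, List.mem_filter]
  constructor
  · rintro ⟨p, ⟨hp, hpk⟩, hpx⟩
    have hx : p.1 = x := by simpa using hpx
    have hk : p.1 ≠ k := by simpa using hpk
    exact ⟨hx ▸ hk, ⟨p, hp, hpx⟩⟩
  · rintro ⟨hxk, p, hp, hpx⟩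
    have hx : p.1 = x := by simpa using hpx
    exact ⟨p, ⟨hp, by simp [hx, hxk]⟩, hpx⟩

theorem pvDict_keys_erase {κ ν : Type} [BEq κ] (d : PySem.Dict κ ν) (k : κ) :
    (d.erase k).keys = d.keys.filter (fun x => !(x == k)) := by
  show List.map Prod.fst (List.filter _ d.items)
      = List.filter (fun x => !(x == k)) (List.map Prod.fst d.items)
  rw [List.filter_map]
  rfl

theorem pvDict_nodup_keys_erase {κ ν : Type} [BEq κ] {d : PySem.Dict κ ν} (k : κ)
    (h : d.keys.Nodup) : (d.erase k).keys.Nodup := by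
  rw [pvDict_keys_erase]; exact h.filter _

-- ---- A's neighbour dict, rephrased as a counter over the flattened neighbour list ----
def pvNDict (dim : Int) (K : List (List Int)) : PySem.Dict (List Int) Int :=
  (K.flatMap (fun c => get_neighbours c dim)).foldl
    (fun nb x => nb.modify x 0 (· + 1)) PySem.Dict.empty

theorem pvInc_eq (nb : PySem.Dict (List Int) Int) (item : List Int) :
    (if (nb.get? item).isNone then nb.insert item 1 else nb.modify item 0 (· + 1))
      = nb.modify item 0 (· + 1) := by
  cases h : nb.get? item with
  | none =>
      have h0 : nb.getD item 0 = 0 := PySem.Dict.getD_of_get?_eq_none nb 0 h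
      simp [h, PySem.Dict.modify, h0]
  | some v => simp [h]

theorem pvNeighbours_eq (dim : Int) (K : List (List Int)) :
    K.foldl (fun nb k =>
      (get_neighbours k dim).foldl (fun nb item =>
        if (nb.get? item).isNone then nb.insert item 1 else nb.modify item 0 (· + 1)) nb)
      PySem.Dict.empty = pvNDict dim K := by
  have hf : (fun (nb : PySem.Dict (List Int) Int) item =>
      if (nb.get? item).isNone then nb.insert item 1 else nb.modify item 0 (· + 1))
      = fun nb item => nb.modify item 0 (· + 1) :=
    funext fun nb => funext fun item => pvInc_eq nb item
  rw [hf, pvNDict, List.foldl_flatMap]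

theorem pvNDict_keys (dim : Int) (K : List (List Int)) :
    (pvNDict dim K).keys = PySem.Set.ofList (K.flatMap (fun c => get_neighbours c dim)) := by
  rw [pvNDict, PySem.Dict.keys_foldl_modify _ _ (fun _ _ => (· + 1)), PySem.Dict.keys_empty,
    PySem.Set.update_nil_left]

theorem pvNDict_getD (dim : Int) (K : List (List Int)) (x : List Int) :
    (pvNDict dim K).getD x 0 = ((K.flatMap (fun c => get_neighbours c dim)).count x : Int) := by
  rw [pvNDict, PySem.Dict.getD_foldl_modify_add_one, PySem.Dict.getD_empty, zero_add]

theorem pvNDict_keys_nodup (dim : Int) (K : List (List Int)) : (pvNDict dim K).keys.Nodup := by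
  rw [pvNDict_keys]; exact PySem.Set.nodup_ofList _

-- ---- A's update loop ----
def pvUpd (cubes : PySem.Dict (List Int) Bool) (kv : List Int × Int) :
    PySem.Dict (List Int) Bool :=
  if cubes.contains kv.1 = true then
    if ¬(kv.2 = 3 ∨ kv.2 = 4) then cubes.erase kv.1 else cubes
  else
    if kv.2 = 3 then cubes.insert kv.1 true else cubes

-- survive iff seen 3 or 4 times (self included), born iff seen exactly 3 times
def pvCondA (b : Bool) (v : Int) : Prop := (b = true ∧ (v = 3 ∨ v = 4)) ∨ (¬b = true ∧ v = 3)

theorem pvUpd_contains_other (cubes : PySem.Dict (List Int) Bool) (kv : List Int × Int)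
    (x : List Int) (hx : x ≠ kv.1) : (pvUpd cubes kv).contains x = cubes.contains x := by
  unfold pvUpd
  split_ifs with h1 h2 h3
  · rfl
  · rw [Bool.eq_iff_iff, pvDict_contains_erase]
    constructor
    · rintro ⟨-, hc⟩; exact hc
    · intro hc; exact ⟨hx, hc⟩
  · rw [PySem.Dict.contains_insert]; simp [beq_iff_eq, hx]
  · rfl

theorem pvUpd_contains_self (cubes : PySem.Dict (List Int) Bool) (kv : List Int × Int) :
    ((pvUpd cubes kv).contains kv.1 = true) ↔ pvCondA (cubes.contains kv.1) kv.2 := by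
  unfold pvUpd pvCondA
  split_ifs with h1 h2 h3
  · simp [h1, h2]
  · rw [pvDict_contains_erase]; simp [h1, h2]
  · simp [PySem.Dict.contains_insert_self, h1, h3]
  · simp [h1, h3]

theorem pvUpd_keys_nodup (cubes : PySem.Dict (List Int) Bool) (kv : List Int × Int)
    (h : cubes.keys.Nodup) : (pvUpd cubes kv).keys.Nodup := by
  unfold pvUpd
  split_ifs
  · exact h
  · exact pvDict_nodup_keys_erase _ h
  · exact PySem.Dict.nodup_keys_insert _ _ _ h
  · exact h

theorem pvUpdFold_contains (L : List (List Int × Int)) (hnd : (L.map Prod.fst).Nodup)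
    (cubes : PySem.Dict (List Int) Bool) (x : List Int) :
    ((L.foldl pvUpd cubes).contains x = true) ↔
      ((∃ v, (x, v) ∈ L ∧ pvCondA (cubes.contains x) v)
        ∨ ((∀ v, (x, v) ∉ L) ∧ cubes.contains x = true)) := by
  induction L generalizing cubes with
  | nil => simp
  | cons kv t ih =>
      obtain ⟨k, v⟩ := kv
      simp only [List.map_cons, List.nodup_cons] at hnd
      obtain ⟨hk, hndt⟩ := hnd
      rw [List.foldl_cons, ih hndt]
      by_cases hxk : x = k
      · subst hxk
        have hxt : ∀ w, (x, w) ∉ t := by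
          intro w hw
          exact hk (List.mem_map.mpr ⟨(x, w), hw, rfl⟩)
        constructor
        · rintro (⟨w, hw, -⟩ | ⟨-, hc⟩)
          · exact absurd hw (hxt w)
          · rw [pvUpd_contains_self] at hc
            exact Or.inl ⟨v, by simp, hc⟩
        · rintro (⟨w, hw, hcond⟩ | ⟨hnone, -⟩)
          · rcases List.mem_cons.mp hw with heq | hin
            · obtain ⟨-, rfl⟩ := Prod.mk.injEq .. ▸ heq
              right
              refine ⟨hxt, ?_⟩
              rw [pvUpd_contains_self]
              exact hcond
            · exact absurd hin (hxt w)
          · exact absurd (List.mem_cons_self ..) (hnone v)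
      · have hcc : (pvUpd cubes (k, v)).contains x = cubes.contains x :=
          pvUpd_contains_other cubes (k, v) x hxk
        rw [hcc]
        have hmem : ∀ w, ((x, w) ∈ (k, v) :: t) ↔ (x, w) ∈ t := by
          intro w
          simp [Prod.ext_iff, hxk]
        simp only [hmem]

-- ---- B's candidate set and step ----
theorem mem_cand_fold (offsets : List (List Int)) :
    ∀ (l : List (List Int)) (cs : PySem.Set (List Int)) (y : List Int),
    (y ∈ l.foldl (fun cs c =>
        offsets.foldl (fun cs o => PySem.Set.add cs (pvAddVec c o)) cs) cs)
      ↔ y ∈ cs ∨ ∃ c ∈ l, ∃ o ∈ offsets, y = pvAddVec c o := by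
  intro l
  induction l with
  | nil => simp
  | cons c t ih =>
      intro cs y
      rw [List.foldl_cons, ih, PySem.Set.mem_foldl_add offsets (pvAddVec c) cs y]
      constructor
      · rintro ((hy | ⟨o, ho, rfl⟩) | ⟨a, ha, o, ho, rfl⟩)
        · exact Or.inl hy
        · exact Or.inr ⟨c, by simp, o, ho, rfl⟩
        · exact Or.inr ⟨a, by simp [ha], o, ho, rfl⟩
      · rintro (hy | ⟨a, ha, o, ho, rfl⟩)
        · exact Or.inl (Or.inl hy)
        · rcases List.mem_cons.mp ha with rfl | ha'
          · exact Or.inl (Or.inr ⟨o, ho, rfl⟩)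
          · exact Or.inr ⟨a, ha', o, ho, rfl⟩

theorem mem_pvCand (offsets : List (List Int)) (active : PySem.Set (List Int)) (y : List Int) :
    y ∈ pvCand offsets active ↔
      y ∈ active ∨ ∃ c ∈ active, ∃ o ∈ offsets, y = pvAddVec c o := by
  rw [pvCand, mem_cand_fold]

theorem pvStepB_eq_fold (offsets : List (List Int)) (active : PySem.Set (List Int)) :
    pvStepBP offsets active = (pvCand offsets active).foldl (fun nxt c =>
      if offsets.countP (fun o => PySem.Set.contains active (pvAddVec c o)) = 3 ∨
          (offsets.countP (fun o => PySem.Set.contains active (pvAddVec c o)) = 2 ∧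
            PySem.Set.contains active c = true)
        then PySem.Set.add nxt c else nxt) PySem.Set.empty := rfl

theorem mem_pvStepB (offsets : List (List Int)) (active : PySem.Set (List Int)) (x : List Int) :
    x ∈ pvStepBP offsets active ↔ x ∈ pvCand offsets active ∧
      (offsets.countP (fun o => PySem.Set.contains active (pvAddVec x o)) = 3 ∨
        (offsets.countP (fun o => PySem.Set.contains active (pvAddVec x o)) = 2 ∧
          PySem.Set.contains active x = true)) := by
  rw [pvStepB_eq_fold, PySem.List.foldl_ite_eq_foldl_filter _ (fun nxt c => PySem.Set.add nxt c),
    PySem.Set.mem_foldl_add _ (fun (c : List Int) => c)]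
  simp only [PySem.Set.empty, List.not_mem_nil, false_or, List.mem_filter, decide_eq_true_eq]
  constructor
  · rintro ⟨b, ⟨hb, hP⟩, rfl⟩
    exact ⟨hb, hP⟩
  · intro h
    exact ⟨x, ⟨h.1, h.2⟩, rfl⟩

theorem pvStepB_nodup (offsets : List (List Int)) (active : PySem.Set (List Int)) :
    (pvStepBP offsets active).Nodup := by
  rw [pvStepB_eq_fold]
  refine foldl_preserve List.Nodup _ _ ?_ _ (by simp [PySem.Set.empty])
  intro s c hs
  split_ifs
  · exact PySem.Set.nodup_add s _ hs
  · exact hs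

-- ---- the per-generation invariant and step equivalence ----
def pvRel (d : Nat) (C : PySem.Dict (List Int) Bool) (S : PySem.Set (List Int)) : Prop :=
  C.keys.Nodup ∧ S.Nodup ∧ pvCellsOK d C.keys ∧ pvCellsOK d S ∧ (∀ x, x ∈ C.keys ↔ x ∈ S)

theorem step_rel {d : Nat} {dim : Int}
    (hgn : ∀ c : List Int, c.length = d → get_neighbours c dim = pvNbhd d c)
    (C : PySem.Dict (List Int) Bool) (S : PySem.Set (List Int))
    (h : pvRel d C S) : pvRel d (pvStepAP dim C) (pvStepBP (pvOffsets d) S) := by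
  obtain ⟨hCnd, hSnd, hCok, hSok, hmem⟩ := h
  set K := C.keys with hK
  set L := K.flatMap (fun c => get_neighbours c dim) with hL
  have hgnK : ∀ c ∈ K, get_neighbours c dim = pvNbhd d c := fun c hc => hgn c (hCok c hc)
  have hmemL : ∀ x, x ∈ L ↔ ∃ a ∈ K, x ∈ pvNbhd d a := by
    intro x
    rw [hL, List.mem_flatMap]
    constructor
    · rintro ⟨a, ha, hx⟩; exact ⟨a, ha, by rwa [hgnK a ha] at hx⟩
    · rintro ⟨a, ha, hx⟩; exact ⟨a, ha, by rwa [hgnK a ha]⟩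
  have hLlen : ∀ x ∈ L, x.length = d := by
    intro x hx
    obtain ⟨a, ha, hxa⟩ := (hmemL x).mp hx
    exact length_of_mem_pvNbhd (hCok a ha) hxa
  have hstepA : pvStepAP dim C = (pvNDict dim K).items.foldl pvUpd C := by
    unfold pvStepAP pvUpd pvNbCountP
    rw [pvNeighbours_eq]
  have hNnd := pvNDict_keys_nodup dim K
  have hfst : ((pvNDict dim K).items.map Prod.fst).Nodup := hNnd
  have hkeysL : ∀ x, x ∈ (pvNDict dim K).keys ↔ x ∈ L := by
    intro x
    rw [pvNDict_keys]
    exact PySem.Set.mem_ofList _ _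
  have hitems : ∀ x v, ((x, v) ∈ (pvNDict dim K).items) ↔ (x ∈ L ∧ v = (L.count x : Int)) := by
    intro x v
    rw [PySem.Dict.items_eq_map_keys _ hNnd 0]
    constructor
    · intro hm
      obtain ⟨k, hk, hkv⟩ := List.mem_map.mp hm
      obtain ⟨rfl, rfl⟩ : k = x ∧ (pvNDict dim K).getD k 0 = v := by
        constructor
        · exact congrArg Prod.fst hkv
        · exact congrArg Prod.snd hkv
      exact ⟨(hkeysL k).mp hk, (pvNDict_getD dim K k).symm ▸ rfl⟩
    · rintro ⟨hxL, rfl⟩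
      exact List.mem_map.mpr ⟨x, (hkeysL x).mpr hxL, by rw [pvNDict_getD]⟩
  have hAchar : ∀ x, ((pvStepAP dim C).contains x = true) ↔
      (x ∈ L ∧ pvCondA (C.contains x) ((L.count x : Int))) := by
    intro x
    rw [hstepA, pvUpdFold_contains _ hfst]
    constructor
    · rintro (⟨v, hv, hcond⟩ | ⟨hnone, hc⟩)
      · obtain ⟨hxL, rfl⟩ := (hitems x v).mp hv
        exact ⟨hxL, hcond⟩
      · have hxK : x ∈ K := (PySem.Dict.contains_iff_mem_keys _ x).mp hc
        have hxL : x ∈ L := (hmemL x).mpr ⟨x, hxK, self_mem_pvNbhd (hCok x hxK)⟩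
        exact absurd ((hitems x _).mpr ⟨hxL, rfl⟩) (hnone (L.count x : Int))
    · rintro ⟨hxL, hcond⟩
      exact Or.inl ⟨(L.count x : Int), (hitems x _).mpr ⟨hxL, rfl⟩, hcond⟩
  have hcand : ∀ x, x ∈ pvCand (pvOffsets d) S ↔ x ∈ L := by
    intro x
    rw [mem_pvCand, hmemL]
    constructor
    · rintro (hxS | ⟨c, hc, o, ho, rfl⟩)
      · have hxK := (hmem x).mpr hxS
        exact ⟨x, hxK, self_mem_pvNbhd (hCok x hxK)⟩
      · have hcK := (hmem c).mpr hc
        exact ⟨c, hcK, (mem_pvNbhd_iff_self_or_offset (hSok c hc)).mpr (Or.inr ⟨o, ho, rfl⟩)⟩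
    · intro hex
      obtain ⟨a, haK, hxn⟩ := hex
      have hsplit := (mem_pvNbhd_iff_self_or_offset (hCok a haK)).mp hxn
      rcases hsplit with rfl | ⟨o, ho, rfl⟩
      · exact Or.inl ((hmem _).mp haK)
      · exact Or.inr ⟨a, (hmem a).mp haK, o, ho, rfl⟩
  have hbridge : ∀ x, x.length = d →
      L.count x = (pvOffsets d).countP (fun o => decide (pvAddVec x o ∈ K))
        + (if x ∈ K then 1 else 0) := by
    intro x hx
    have hMnd : ((pvOffsets d).map (pvAddVec x)).Nodup := by
      refine List.Nodup.map_on ?_ (pvOffsets_nodup d)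
      intro o1 h1 o2 h2 he
      exact pvAddVec_inj (by rw [pvOffsets_length h1, hx]) (by rw [pvOffsets_length h2, hx]) he
    calc L.count x
        = K.countP (fun a => decide (x ∈ pvNbhd d a)) := pvCount_flatMap_nbhd hCok hgnK x
      _ = K.countP (fun a => decide (a ∈ pvNbhd d x)) :=
          List.countP_congr (fun a ha => by simp [mem_pvNbhd_comm (hCok a ha) hx])
      _ = K.countP (fun a => decide (a = x ∨ a ∈ (pvOffsets d).map (pvAddVec x))) :=
          List.countP_congr (fun a ha => by
            simp only [decide_eq_true_eq]
            rw [mem_pvNbhd_iff_self_or_offset hx]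
            simp [List.mem_map, eq_comm])
      _ = K.countP (fun a => decide (a = x))
            + K.countP (fun a => decide (a ∈ (pvOffsets d).map (pvAddVec x))) := by
          refine pvCountP_or_disjoint ?_
          intro a _ hpq
          obtain ⟨hax, hamem⟩ := hpq
          subst hax
          obtain ⟨o, ho, heq⟩ := List.mem_map.mp hamem
          have hol : o.length = d := pvOffsets_length ho
          have : o = List.replicate d 0 := (pvAddVec_eq_self hx hol).mp heq
          exact (mem_pvOffsets.mp ho).2 this
      _ = (if x ∈ K then 1 else 0)
            + ((pvOffsets d).map (pvAddVec x)).countP (fun a => decide (a ∈ K)) := by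
          rw [pvCountP_eq_self_ite hCnd x, pvCountP_mem_comm hCnd hMnd]
      _ = (pvOffsets d).countP (fun o => decide (pvAddVec x o ∈ K))
            + (if x ∈ K then 1 else 0) := by
          rw [List.countP_map]
          have hcc : ((fun a => decide (a ∈ K)) ∘ pvAddVec x)
              = (fun o => decide (pvAddVec x o ∈ K)) := rfl
          rw [hcc]
          omega
  have hnB : ∀ x, (pvOffsets d).countP (fun o => PySem.Set.contains S (pvAddVec x o))
      = (pvOffsets d).countP (fun o => decide (pvAddVec x o ∈ K)) := by
    intro x
    refine List.countP_congr ?_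
    intro o ho
    simp only [PySem.Set.contains_iff, decide_eq_true_eq, hmem]
  have hstep_mem : ∀ x, ((pvStepAP dim C).contains x = true) ↔ x ∈ pvStepBP (pvOffsets d) S := by
    intro x
    rw [hAchar, mem_pvStepB, hnB, hcand]
    by_cases hxL : x ∈ L
    · have hx : x.length = d := hLlen x hxL
      have hb := hbridge x hx
      have hcx : C.contains x = true ↔ x ∈ K := PySem.Dict.contains_iff_mem_keys _ x
      have hsx : PySem.Set.contains S x = true ↔ x ∈ K := by
        rw [PySem.Set.contains_iff, hmem]
      set m := (pvOffsets d).countP (fun o => decide (pvAddVec x o ∈ K)) with hm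
      simp only [hxL, true_and]
      unfold pvCondA
      by_cases hxK : x ∈ K
      · rw [if_pos hxK] at hb
        constructor
        · rintro (⟨-, (h3 | h4)⟩ | ⟨hcf, -⟩)
          · right; exact ⟨by omega, hsx.mpr hxK⟩
          · left; omega
          · exact absurd (hcx.mpr hxK) hcf
        · rintro (h3 | ⟨h2, -⟩)
          · exact Or.inl ⟨hcx.mpr hxK, Or.inr (by omega)⟩
          · exact Or.inl ⟨hcx.mpr hxK, Or.inl (by omega)⟩
      · rw [if_neg hxK] at hb
        constructor
        · rintro (⟨hct, -⟩ | ⟨-, h3⟩)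
          · exact absurd (hcx.mp hct) hxK
          · left; omega
        · rintro (h3 | ⟨-, hsc⟩)
          · exact Or.inr ⟨by simp [hcx, hxK], by omega⟩
          · exact absurd (hsx.mp hsc) hxK
    · simp [hxL]
  refine ⟨?_, pvStepB_nodup _ _, ?_, ?_, ?_⟩
  · rw [hstepA]
    exact foldl_preserve (fun c => c.keys.Nodup) pvUpd _
      (fun c kv hc => pvUpd_keys_nodup c kv hc) C hCnd
  · intro x hxk
    have := (hAchar x).mp ((PySem.Dict.contains_iff_mem_keys _ x).mpr hxk)
    exact hLlen x this.1
  · intro x hxS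
    have hx := (mem_pvStepB _ _ x).mp hxS
    exact hLlen x ((hcand x).mp hx.1)
  · intro x
    rw [← PySem.Dict.contains_iff_mem_keys]
    exact hstep_mem x

-- ---- initial-state equivalence ----
theorem pvDict_keys_insert_set {κ ν : Type} [BEq κ] [LawfulBEq κ]
    (d : PySem.Dict κ ν) (k : κ) (v : ν) :
    (d.insert k v).keys = PySem.Set.add d.keys k := by
  by_cases h : d.contains k = true
  · rw [PySem.Dict.keys_insert_of_contains _ _ h,
      PySem.Set.add_of_mem ((PySem.Dict.contains_iff_mem_keys _ _).mp h)]
  · have hf : d.contains k = false := by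
      cases hc : d.contains k
      · rfl
      · exact absurd hc h
    rw [PySem.Dict.keys_insert_of_not_contains _ _ hf,
      PySem.Set.add_of_not_mem (fun hm => h ((PySem.Dict.contains_iff_mem_keys _ _).mpr hm))]

theorem init_keys (cell : Nat → Nat → Bool) (mk : Nat → Nat → List Int) :
    ∀ (ri rj : List Nat) (cubes : PySem.Dict (List Int) Bool) (s : PySem.Set (List Int)),
    cubes.keys = s →
    ((ri.foldl (fun cubes i => rj.foldl (fun cubes j =>
        if cell i j then cubes.insert (mk i j) true else cubes) cubes) cubes).keys
      = ri.foldl (fun s i => rj.foldl (fun s j =>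
        if cell i j then PySem.Set.add s (mk i j) else s) s) s) := by
  have inner : ∀ (rj : List Nat) (i : Nat) (cubes : PySem.Dict (List Int) Bool)
      (s : PySem.Set (List Int)), cubes.keys = s →
      ((rj.foldl (fun cubes j =>
          if cell i j then cubes.insert (mk i j) true else cubes) cubes).keys
        = rj.foldl (fun s j => if cell i j then PySem.Set.add s (mk i j) else s) s) := by
    intro rj
    induction rj with
    | nil => intro i cubes s h; simpa using h
    | cons j t ih =>
        intro i cubes s h
        simp only [List.foldl_cons]
        split_ifs with hc
        · exact ih i _ _ (by rw [pvDict_keys_insert_set, h])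
        · exact ih i _ _ h
  intro ri
  induction ri with
  | nil => intro rj cubes s h; simpa using h
  | cons i t ih =>
      intro rj cubes s h
      simp only [List.foldl_cons]
      exact ih rj _ _ (inner rj i cubes s h)

theorem init_set_nodup (cell : Nat → Nat → Bool) (mk : Nat → Nat → List Int)
    (ri rj : List Nat) :
    (ri.foldl (fun s i => rj.foldl (fun s j =>
      if cell i j then PySem.Set.add s (mk i j) else s) s) PySem.Set.empty).Nodup := by
  refine foldl_preserve List.Nodup _ ri ?_ _ (by simp [PySem.Set.empty])
  intro s i hs
  refine foldl_preserve List.Nodup _ rj ?_ s hs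
  intro s' j hs'
  split_ifs
  · exact PySem.Set.nodup_add s' _ hs'
  · exact hs'

theorem init_set_cells (mk : Nat → Nat → List Int) (d : Nat)
    (hmk : ∀ i j, (mk i j).length = d) (cell : Nat → Nat → Bool) (ri rj : List Nat) :
    pvCellsOK d (ri.foldl (fun s i => rj.foldl (fun s j =>
      if cell i j then PySem.Set.add s (mk i j) else s) s) PySem.Set.empty) := by
  refine foldl_preserve (pvCellsOK d) _ ri ?_ _ (by intro c hc; simp [PySem.Set.empty] at hc)
  intro s i hs
  refine foldl_preserve (pvCellsOK d) _ rj ?_ s hs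
  intro s' j hs'
  split_ifs
  · intro c hc
    rcases (PySem.Set.mem_add _ _ _).mp hc with h | rfl
    · exact hs' c h
    · exact hmk i j
  · exact hs'

theorem pvStepA_empty (dim : Int) : pvStepAP dim PySem.Dict.empty = PySem.Dict.empty := rfl

theorem rel_length {d : Nat} {C : PySem.Dict (List Int) Bool} {S : PySem.Set (List Int)}
    (h : pvRel d C S) : C.keys.length = S.length := by
  obtain ⟨hCnd, hSnd, -, -, hmem⟩ := h
  exact ((List.perm_ext_iff_of_nodup hCnd hSnd).mpr hmem).length_eq


-- ---- simulation: PvHDict / PvHSet coincide with the PySem models ----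
def pvHDRel {ν : Type} (d : PvHDict ν) (pd : PySem.Dict (List Int) ν) : Prop :=
  pd.keys.Nodup ∧ d.rev.reverse = pd.keys ∧ ∀ k, d.hm[k]? = pd.get? k

theorem foldl_rel2 {α β γ : Type} (R : α → β → Prop) (f : α → γ → α) (g : β → γ → β)
    (h : ∀ a b x, R a b → R (f a x) (g b x)) :
    ∀ (l : List γ) a b, R a b → R (l.foldl f a) (l.foldl g b) := by
  intro l
  induction l with
  | nil => intro a b hab; exact hab
  | cons x t ih => intro a b hab; exact ih _ _ (h a b x hab)

theorem pvHDRel_empty {ν : Type} : pvHDRel (PvHDict.empty : PvHDict ν) PySem.Dict.empty := by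
  refine ⟨PySem.Dict.nodup_keys_empty, by simp [PvHDict.empty, PySem.Dict.keys_empty], ?_⟩
  intro k
  simp [PvHDict.empty, PySem.Dict.get?_empty]

theorem pvHDRel_get? {ν : Type} {d : PvHDict ν} {pd : PySem.Dict (List Int) ν}
    (h : pvHDRel d pd) (k : List Int) : d.get? k = pd.get? k := h.2.2 k

theorem pvHDRel_contains {ν : Type} {d : PvHDict ν} {pd : PySem.Dict (List Int) ν}
    (h : pvHDRel d pd) (k : List Int) : d.contains k = pd.contains k := by
  rw [PvHDict.contains, h.2.2 k, PySem.Dict.contains_eq_isSome_get?]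

theorem pvHDRel_getD {ν : Type} {d : PvHDict ν} {pd : PySem.Dict (List Int) ν}
    (h : pvHDRel d pd) (k : List Int) (d0 : ν) : d.getD k d0 = pd.getD k d0 := by
  rw [PvHDict.getD, h.2.2 k, PySem.Dict.getD_eq_get?_getD]

theorem pvHDRel_insert {ν : Type} {d : PvHDict ν} {pd : PySem.Dict (List Int) ν}
    (h : pvHDRel d pd) (k : List Int) (v : ν) :
    pvHDRel (d.insert k v) (pd.insert k v) := by
  obtain ⟨hnd, hkeys, hget⟩ := h
  have hc : (d.hm[k]?).isSome = pd.contains k := by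
    rw [hget k, PySem.Dict.contains_eq_isSome_get?]
  have hget' : ∀ a, (d.hm.insert k v)[a]? = (pd.insert k v).get? a := by
    intro a
    rw [Std.HashMap.getElem?_insert, PySem.Dict.get?_insert]
    by_cases hak : a = k
    · simp [hak]
    · simp [hak, Ne.symm hak, hget a]
  unfold PvHDict.insert
  by_cases hs : (d.hm[k]?).isSome
  · rw [if_pos hs]
    refine ⟨PySem.Dict.nodup_keys_insert _ _ _ hnd, ?_, hget'⟩
    simpa [hkeys] using (PySem.Dict.keys_insert_of_contains pd (v := v) (hc ▸ hs)).symm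
  · rw [if_neg hs]
    have hcf : pd.contains k = false := by
      cases hpc : pd.contains k
      · rfl
      · exact absurd (hc.trans hpc) hs
    refine ⟨PySem.Dict.nodup_keys_insert _ _ _ hnd, ?_, hget'⟩
    simp [PySem.Dict.keys_insert_of_not_contains pd v hcf, hkeys]

theorem pvHDRel_modify {ν : Type} {d : PvHDict ν} {pd : PySem.Dict (List Int) ν}
    (h : pvHDRel d pd) (k : List Int) (d0 : ν) (f : ν → ν) :
    pvHDRel (d.modify k d0 f) (pd.modify k d0 f) := by
  have hm : pd.modify k d0 f = pd.insert k (f (pd.getD k d0)) := rfl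
  rw [PvHDict.modify, hm, pvHDRel_getD h]
  exact pvHDRel_insert h _ _

theorem pvDict_get?_erase {ν : Type} (pd : PySem.Dict (List Int) ν) (k x : List Int) :
    (pd.erase k).get? x = if x = k then none else pd.get? x := by
  obtain ⟨l⟩ := pd
  induction l with
  | nil => split_ifs <;> rfl
  | cons p t ih =>
      obtain ⟨pk, pv⟩ := p
      show (PySem.Dict.mk (((pk, pv) :: t).filter (fun q => !(q.1 == k)))).get? x = _
      by_cases hpk : pk = k
      · have hf : (((pk, pv) :: t).filter (fun q => !(q.1 == k)))
            = t.filter (fun q => !(q.1 == k)) := by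
          simp [List.filter_cons, hpk]
        rw [hf,
          show (PySem.Dict.mk (t.filter (fun q => !(q.1 == k)))) = (PySem.Dict.mk t).erase k
            from rfl, ih]
        by_cases hxk : x = k
        · simp [hxk]
        · simp only [hxk, if_false]
          rw [PySem.Dict.get?_mk_cons]
          simp [hpk, Ne.symm hxk]
      · have hf : (((pk, pv) :: t).filter (fun q => !(q.1 == k)))
            = (pk, pv) :: t.filter (fun q => !(q.1 == k)) := by
          simp [List.filter_cons, hpk]
        rw [hf, PySem.Dict.get?_mk_cons]
        by_cases hpx : pk = x
        · have hxk : ¬(x = k) := by rw [← hpx]; exact hpk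
          rw [if_neg hxk, PySem.Dict.get?_mk_cons]
          simp [hpx]
        · rw [show (pk == x) = false by simp [hpx],
            show (PySem.Dict.mk (t.filter (fun q => !(q.1 == k)))) = (PySem.Dict.mk t).erase k
              from rfl, ih]
          by_cases hxk : x = k
          · simp [hxk]
          · rw [if_neg hxk, if_neg hxk, PySem.Dict.get?_mk_cons,
              show (pk == x) = false by simp [hpx]]

theorem pvHDRel_erase {ν : Type} {d : PvHDict ν} {pd : PySem.Dict (List Int) ν}
    (h : pvHDRel d pd) (k : List Int) : pvHDRel (d.erase k) (pd.erase k) := by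
  obtain ⟨hnd, hkeys, hget⟩ := h
  refine ⟨pvDict_nodup_keys_erase k hnd, ?_, ?_⟩
  · show (d.rev.filter (fun x => !(x == k))).reverse = (pd.erase k).keys
    rw [pvDict_keys_erase, ← hkeys, List.filter_reverse]
  · intro a
    show (d.hm.erase k)[a]? = _
    rw [Std.HashMap.getElem?_erase, pvDict_get?_erase]
    by_cases hak : a = k
    · simp [hak]
    · simp [hak, Ne.symm hak, hget a]

theorem pvDict_items_eq_filterMap {ν : Type} (pd : PySem.Dict (List Int) ν)
    (hnd : pd.keys.Nodup) :
    pd.keys.filterMap (fun k => (pd.get? k).map (fun v => (k, v))) = pd.items := by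
  obtain ⟨l⟩ := pd
  induction l with
  | nil => rfl
  | cons p t ih =>
      have hkeys : (PySem.Dict.mk (p :: t)).keys = p.1 :: (PySem.Dict.mk t).keys := rfl
      rw [hkeys] at hnd ⊢
      obtain ⟨hp, hndt⟩ := List.nodup_cons.mp hnd
      rw [List.filterMap_cons]
      have h1 : (PySem.Dict.mk (p :: t)).get? p.1 = some p.2 := by
        rw [PySem.Dict.get?_mk_cons]; simp
      rw [h1]
      have h2 : (PySem.Dict.mk t).keys.filterMap
          (fun k => ((PySem.Dict.mk (p :: t)).get? k).map (fun v => (k, v)))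
          = (PySem.Dict.mk t).keys.filterMap
          (fun k => ((PySem.Dict.mk t).get? k).map (fun v => (k, v))) := by
        refine List.filterMap_congr ?_
        intro k hk
        rw [PySem.Dict.get?_mk_cons]
        have : ¬(p.1 = k) := fun he => hp (he ▸ hk)
        simp [this]
      simp only [Option.map_some]
      rw [h2, ih hndt]

theorem pvHDRel_items {ν : Type} {d : PvHDict ν} {pd : PySem.Dict (List Int) ν}
    (h : pvHDRel d pd) : d.items = pd.items := by
  obtain ⟨hnd, hkeys, hget⟩ := h
  rw [PvHDict.items, hkeys]
  rw [← pvDict_items_eq_filterMap pd hnd]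
  refine List.filterMap_congr ?_
  intro k _
  rw [hget k]

theorem pvHDRel_keys {ν : Type} {d : PvHDict ν} {pd : PySem.Dict (List Int) ν}
    (h : pvHDRel d pd) : d.keys = pd.keys := h.2.1

-- step A simulation
theorem pvNbCount_rel (dim : Int) (ks : List (List Int)) :
    pvHDRel (pvNbCount dim ks) (pvNbCountP dim ks) := by
  unfold pvNbCount pvNbCountP
  refine foldl_rel2 pvHDRel _ _ ?_ _ _ _ pvHDRel_empty
  intro a b k hab
  refine foldl_rel2 pvHDRel _ _ ?_ _ _ _ hab
  intro a b item hab'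
  rw [pvHDRel_get? hab' item]
  split_ifs
  · exact pvHDRel_insert hab' _ _
  · exact pvHDRel_modify hab' _ _ _

theorem pvStepA_rel {dim : Int} {c : PvHDict Bool} {pc : PySem.Dict (List Int) Bool}
    (h : pvHDRel c pc) : pvHDRel (pvStepA dim c) (pvStepAP dim pc) := by
  unfold pvStepA pvStepAP
  rw [pvHDRel_keys h, pvHDRel_items (pvNbCount_rel dim pc.keys)]
  refine foldl_rel2 pvHDRel _ _ ?_ _ _ _ h
  intro a b kv hab
  rw [pvHDRel_contains hab kv.1]
  split_ifs
  · exact hab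
  · exact pvHDRel_erase hab _
  · exact pvHDRel_insert hab _ _
  · exact hab

theorem find_eq_findP (lista : List (List Bool)) (dim : Int) :
    find lista dim = pvFindP lista dim := by
  unfold find pvFindP
  have hinit : pvHDRel
      ((List.range lista.length).foldl (fun cubes i =>
        (List.range (lista.headD []).length).foldl (fun cubes j =>
          if (lista.getD i []).getD j false then
            if dim = 4 then cubes.insert [0, 0, (i : Int), (j : Int)] true
            else if dim = 3 then cubes.insert [0, (i : Int), (j : Int)] true
            else cubes
          else cubes) cubes) PvHDict.empty)
      ((List.range lista.length).foldl (fun cubes i =>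
        (List.range (lista.headD []).length).foldl (fun cubes j =>
          if (lista.getD i []).getD j false then
            if dim = 4 then cubes.insert [0, 0, (i : Int), (j : Int)] true
            else if dim = 3 then cubes.insert [0, (i : Int), (j : Int)] true
            else cubes
          else cubes) cubes) PySem.Dict.empty) := by
    refine foldl_rel2 pvHDRel _ _ ?_ _ _ _ pvHDRel_empty
    intro a b i hab
    refine foldl_rel2 pvHDRel _ _ ?_ _ _ _ hab
    intro a b j hab'
    split_ifs
    · exact pvHDRel_insert hab' _ _
    · exact pvHDRel_insert hab' _ _
    · exact hab'
    · exact hab'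
  have hfold : pvHDRel
      ((List.range 6).foldl (fun cubes _ => pvStepA dim cubes) _)
      ((List.range 6).foldl (fun cubes _ => pvStepAP dim cubes) _) :=
    foldl_rel (pvHDRel) (pvStepA dim) (pvStepAP dim) (fun a b => pvStepA_rel) (List.range 6)
      _ _ hinit
  exact congrArg (fun l => ((l.length : Nat) : Int)) (pvHDRel_keys hfold)

-- set simulation
def pvHSRel (s : PvHSet) (l : PySem.Set (List Int)) : Prop :=
  s.rev.reverse = l ∧ ∀ x, (s.hm[x]?).isSome = decide (x ∈ l)

theorem pvHSRel_empty : pvHSRel PvHSet.empty PySem.Set.empty := by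
  refine ⟨rfl, ?_⟩
  intro x
  simp [PvHSet.empty, PySem.Set.empty]

theorem pvSet_contains_eq (l : PySem.Set (List Int)) (x : List Int) :
    PySem.Set.contains l x = decide (x ∈ l) := by
  rw [Bool.eq_iff_iff, PySem.Set.contains_iff, decide_eq_true_eq]

theorem pvHSRel_contains {s : PvHSet} {l : PySem.Set (List Int)} (h : pvHSRel s l)
    (x : List Int) : s.contains x = PySem.Set.contains l x := by
  rw [PvHSet.contains, h.2 x, pvSet_contains_eq]

theorem pvHSRel_add {s : PvHSet} {l : PySem.Set (List Int)} (h : pvHSRel s l)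
    (x : List Int) : pvHSRel (s.add x) (PySem.Set.add l x) := by
  obtain ⟨hrev, hmem⟩ := h
  unfold PvHSet.add
  by_cases hs : (s.hm[x]?).isSome
  · have hx : x ∈ l := by
      have := hmem x
      rw [hs] at this
      exact of_decide_eq_true this.symm
    rw [if_pos hs, PySem.Set.add_of_mem hx]
    exact ⟨hrev, hmem⟩
  · have hx : ¬(x ∈ l) := by
      intro hc
      exact hs ((hmem x).trans (decide_eq_true hc) )
    rw [if_neg hs, PySem.Set.add_of_not_mem hx]
    refine ⟨by simp [hrev], ?_⟩
    intro a
    rw [Std.HashMap.getElem?_insert]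
    by_cases hax : x = a
    · simp [hax]
    · simp only [show (x == a) = false by simp [hax], Bool.false_eq_true, if_false]
      rw [hmem a]
      simp [List.mem_append, Ne.symm hax]

theorem pvHSRel_toList {s : PvHSet} {l : PySem.Set (List Int)} (h : pvHSRel s l) :
    s.toList = l := h.1

theorem pvHSRel_size {s : PvHSet} {l : PySem.Set (List Int)} (h : pvHSRel s l) :
    s.size = l.length := by
  rw [PvHSet.size, ← h.1, List.length_reverse]

theorem pvCandH_rel {offsets : List (List Int)} {s : PvHSet} {l : PySem.Set (List Int)}
    (h : pvHSRel s l) : pvHSRel (pvCandH offsets s) (pvCand offsets l) := by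
  unfold pvCandH pvCand
  rw [pvHSRel_toList h]
  refine foldl_rel2 pvHSRel _ _ ?_ _ _ _ h
  intro a b c hab
  refine foldl_rel2 pvHSRel _ _ ?_ _ _ _ hab
  intro a b o hab'
  exact pvHSRel_add hab' _

theorem pvStepB_rel {offsets : List (List Int)} {s : PvHSet} {l : PySem.Set (List Int)}
    (h : pvHSRel s l) : pvHSRel (pvStepB offsets s) (pvStepBP offsets l) := by
  unfold pvStepB pvStepBP
  rw [pvHSRel_toList (pvCandH_rel (offsets := offsets) h)]
  refine foldl_rel2 pvHSRel _ _ ?_ _ _ _ pvHSRel_empty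
  intro a b c hab
  have hcnt : offsets.countP (fun o => s.contains (pvAddVec c o))
      = offsets.countP (fun o => PySem.Set.contains l (pvAddVec c o)) := by
    refine List.countP_congr ?_
    intro o _
    rw [pvHSRel_contains h]
  simp only [hcnt, pvHSRel_contains h c]
  split_ifs
  · exact pvHSRel_add hab _
  · exact hab

theorem find_alt_eq_altP (lista : List (List Bool)) (dim : Int) :
    find_alt lista dim = pvAltP lista dim := by
  unfold find_alt pvAltP
  have hinit : ∀ mk : Nat → Nat → List Int, pvHSRel (pvInitB lista mk) (pvInitBP lista mk) := by
    intro mk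
    unfold pvInitB pvInitBP
    refine foldl_rel2 pvHSRel _ _ ?_ _ _ _ pvHSRel_empty
    intro a b i hab
    refine foldl_rel2 pvHSRel _ _ ?_ _ _ _ hab
    intro a b j hab'
    split_ifs
    · exact pvHSRel_add hab' _
    · exact hab'
  split_ifs
  · have := foldl_rel pvHSRel (pvStepB (pvOffsets 4)) (pvStepBP (pvOffsets 4))
      (fun a b => pvStepB_rel) (List.range 6) _ _
      (hinit (fun i j => [0, 0, (i : Int), (j : Int)]))
    exact congrArg Int.ofNat (pvHSRel_size this)
  · have := foldl_rel pvHSRel (pvStepB (pvOffsets 3)) (pvStepBP (pvOffsets 3))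
      (fun a b => pvStepB_rel) (List.range 6) _ _
      (hinit (fun i j => [0, (i : Int), (j : Int)]))
    exact congrArg Int.ofNat (pvHSRel_size this)
  · rfl

-- ===== VERDICT (by name: the statement is the Claim_ definition above) =====
theorem pvFindP_eq (lista : List (List Bool)) (dim : Int) :
    pvFindP lista dim = pvAltP lista dim := by
  unfold pvFindP pvAltP
  by_cases h4 : dim = 4
  · subst h4
    simp only [if_true]
    set mk : Nat → Nat → List Int := fun i j => [0, 0, (i : Int), (j : Int)] with hmk
    set cell : Nat → Nat → Bool := fun i j => (lista.getD i []).getD j false with hcell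
    set initS := pvInitBP lista mk with hinitS
    have hkeys := init_keys cell mk (List.range lista.length)
      (List.range (lista.headD []).length) PySem.Dict.empty PySem.Set.empty
      PySem.Dict.keys_empty
    have hrel0 : pvRel 4
        ((List.range lista.length).foldl (fun cubes i =>
          (List.range (lista.headD []).length).foldl (fun cubes j =>
            if cell i j then cubes.insert (mk i j) true else cubes) cubes) PySem.Dict.empty)
        initS := by
      refine ⟨?_, ?_, ?_, ?_, ?_⟩
      · rw [hkeys]; exact init_set_nodup cell mk _ _
      · exact init_set_nodup cell mk _ _
      · rw [hkeys]; exact init_set_cells mk 4 (fun i j => rfl) cell _ _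
      · exact init_set_cells mk 4 (fun i j => rfl) cell _ _
      · intro x; rw [hkeys]; exact Iff.rfl
    have hrel := foldl_rel (pvRel 4) (pvStepAP 4) (pvStepBP (pvOffsets 4))
      (step_rel (fun c hc => by exact_mod_cast get_neighbours_eq_4 hc))
      (List.range 6) _ _ hrel0
    exact congrArg Int.ofNat (rel_length hrel)
  · by_cases h3 : dim = 3
    · subst h3
      simp only [show ((3:Int) = 4) ↔ False from by norm_num, if_false, if_true]
      set mk : Nat → Nat → List Int := fun i j => [0, (i : Int), (j : Int)] with hmk
      set cell : Nat → Nat → Bool := fun i j => (lista.getD i []).getD j false with hcell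
      set initS := pvInitBP lista mk with hinitS
      have hkeys := init_keys cell mk (List.range lista.length)
        (List.range (lista.headD []).length) PySem.Dict.empty PySem.Set.empty
        PySem.Dict.keys_empty
      have hrel0 : pvRel 3
          ((List.range lista.length).foldl (fun cubes i =>
            (List.range (lista.headD []).length).foldl (fun cubes j =>
              if cell i j then cubes.insert (mk i j) true else cubes) cubes) PySem.Dict.empty)
          initS := by
        refine ⟨?_, ?_, ?_, ?_, ?_⟩
        · rw [hkeys]; exact init_set_nodup cell mk _ _
        · exact init_set_nodup cell mk _ _
        · rw [hkeys]; exact init_set_cells mk 3 (fun i j => rfl) cell _ _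
        · exact init_set_cells mk 3 (fun i j => rfl) cell _ _
        · intro x; rw [hkeys]; exact Iff.rfl
      have hrel := foldl_rel (pvRel 3) (pvStepAP 3) (pvStepBP (pvOffsets 3))
        (step_rel (fun c hc => by exact_mod_cast get_neighbours_eq_3 hc))
        (List.range 6) _ _ hrel0
      exact congrArg Int.ofNat (rel_length hrel)
    · simp only [show (dim = 4) ↔ False from by simp [h4], if_false,
        show (dim = 3) ↔ False from by simp [h3], if_false, ite_self]
      simp only [PySem.List.foldl_ignore]
      have hempty : (List.range 6).foldl (fun cubes _ => pvStepAP dim cubes) PySem.Dict.empty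
          = PySem.Dict.empty := by
        refine foldl_preserve (fun c => c = PySem.Dict.empty) _ _ ?_ _ rfl
        intro c _ hc
        rw [hc, pvStepA_empty]
      rw [hempty, PySem.Dict.keys_empty]
      rfl

theorem find_spec : Claim_equal_find := by
  intro lista dim _ _
  unfold Spec_find
  rw [find_eq_findP, find_alt_eq_altP]
  exact pvFindP_eq lista dim
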